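-- pv_equiv track=rewrite | github.com/welermoura/reportvpn | security_events/api/radar_scanner.py | bfs_shortest_path_to_any_priv
-- ===== SOURCE A (Python) =====
-- from collections import defaultdict, deque
--
-- def bfs_shortest_path_to_any_priv(start_dn, adj, priv_dns, max_depth=15):
--     q = deque([start_dn])
--     prev = {start_dn: None}
--     depth = {start_dn: 0}
--
--     while q:
--         cur = q.popleft()
--         d = depth[cur]
--         if d > max_depth:
--             continue
--
--         if cur in priv_dns and cur != start_dn:
--             path = []
--             x = cur
--             while x is not None:
--                 path.append(x)
--                 x = prev[x]
--             path.reverse()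
--             return cur, path
--
--         for nxt in adj.get(cur, []):
--             if nxt not in prev:
--                 prev[nxt] = cur
--                 depth[nxt] = d + 1
--                 q.append(nxt)
--
--     return None, None
-- ===== SOURCE B (Python) =====
-- def bfs_shortest_path_to_any_priv(start_dn, adj, priv_dns, max_depth=15):
--     prev = {start_dn: None}
--     frontier = [start_dn]
--     depth = 0
--     while frontier and depth <= max_depth:
--         nxt_frontier = []
--         for node in frontier:
--             if node in priv_dns and node != start_dn:
--                 path = []
--                 x = node
--                 while x is not None:
--                     path.append(x)
--                     x = prev[x]
--                 path.reverse()
--                 return node, path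
--             for nb in adj.get(node, []):
--                 if nb not in prev:
--                     prev[nb] = node
--                     nxt_frontier.append(nb)
--         frontier = nxt_frontier
--         depth += 1
--     return None, None
-- ===== Notes on version B (the rewrite author's own statement) =====
-- stated objective: alternative
-- what changed: Replaces the deque-plus-per-node-depth-dict BFS by a level-synchronous BFS: a current frontier list and a single integer depth counter per level, collecting each level's unvisited neighbors into the next frontier; the per-node depth dict and the deque disappear.
import Mathlib
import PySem

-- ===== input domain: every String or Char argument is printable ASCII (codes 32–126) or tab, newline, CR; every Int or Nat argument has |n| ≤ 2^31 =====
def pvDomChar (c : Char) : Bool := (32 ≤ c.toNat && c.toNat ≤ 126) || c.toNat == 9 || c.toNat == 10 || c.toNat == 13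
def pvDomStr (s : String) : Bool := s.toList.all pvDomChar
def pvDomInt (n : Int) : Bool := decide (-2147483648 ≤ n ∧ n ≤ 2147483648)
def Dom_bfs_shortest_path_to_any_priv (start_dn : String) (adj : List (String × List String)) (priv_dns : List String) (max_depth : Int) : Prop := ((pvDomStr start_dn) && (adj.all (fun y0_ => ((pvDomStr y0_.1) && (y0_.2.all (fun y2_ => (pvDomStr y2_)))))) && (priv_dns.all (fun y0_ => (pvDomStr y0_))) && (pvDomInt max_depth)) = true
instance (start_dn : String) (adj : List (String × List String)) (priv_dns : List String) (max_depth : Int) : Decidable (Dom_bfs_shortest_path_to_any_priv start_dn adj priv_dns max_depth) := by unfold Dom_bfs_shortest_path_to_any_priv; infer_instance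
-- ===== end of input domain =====

-- B replaces A's deque + per-node depth dict by a level-synchronous BFS with one depth counter per level (alternative decomposition, same cost).


-- ===== PORT A =====
-- Shared literal helper: both Pythons reconstruct the path with the identical
-- 'while x is not None: path.append(x); x = prev[x]' loop followed by reverse.
-- Fuel prev.size + 1 is exact: the prev chain visits distinct keys of prev.
-- prev[x] → getD is exact: every chain node is a key of prev by construction.
def pvBuildPath (prev : PySem.Dict String (Option String)) : Nat → Option String → List String → List String
  | 0, _, path => path.reverse
  | _ + 1, none, path => path.reverse
  | f + 1, some s, path => pvBuildPath prev f (prev.getD s none) (path ++ [s])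

-- Shared fuel bound (a totality guard only): each loop processes at most
-- 1 + Σ |adjacency lists| nodes, since every enqueued node inserts a fresh key
-- into prev and comes from some adjacency list; so this fuel is never exhausted.
def pvFuel (adj : List (String × List String)) : Nat :=
  adj.foldl (fun s p => s + p.2.length) 0 + 1

-- A's while-loop over (queue, prev, depth); one fuel unit per pop.
def pvLoopA (start_dn : String) (adj : List (String × List String)) (priv_dns : List String)
    (max_depth : Int) :
    Nat → List String → PySem.Dict String (Option String) → PySem.Dict String Int →
    Option String × Option (List String)
  | _, [], _, _ => (none, none)
  | 0, _ :: _, _, _ => (none, none)          -- fuel guard only, never reached (see pvFuel)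
  | f + 1, cur :: q, prev, dep =>
      let d := dep.getD cur 0                -- depth[cur]; cur is always a key of depth: exact
      if max_depth < d then                  -- 'if d > max_depth: continue'
        pvLoopA start_dn adj priv_dns max_depth f q prev dep
      else if priv_dns.contains cur && cur != start_dn then
        (some cur, some (pvBuildPath prev (prev.size + 1) (some cur) []))
      else
        let st := ((PySem.Dict.mk adj).getD cur []).foldl
          (fun (st : PySem.Dict String (Option String) × PySem.Dict String Int × List String) nxt =>
            if st.1.contains nxt then st
            else (st.1.insert nxt (some cur), st.2.1.insert nxt (d + 1), st.2.2 ++ [nxt]))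
          (prev, dep, q)
        pvLoopA start_dn adj priv_dns max_depth f st.2.2 st.1 st.2.1

def bfs_shortest_path_to_any_priv (start_dn : String) (adj : List (String × List String)) (priv_dns : List String) (max_depth : Int) : Option String × Option (List String) :=
  pvLoopA start_dn adj priv_dns max_depth (pvFuel adj) [start_dn]
    (PySem.Dict.mk [(start_dn, none)]) (PySem.Dict.mk [(start_dn, 0)])

-- ===== PORT B =====
-- B's level-synchronous loop: the outer 'while frontier and depth <= max_depth'
-- and the inner 'for node in frontier' as one recursion over (frontier, next);
-- one fuel unit per processed node, the level swap is free.
def pvLoopB (start_dn : String) (adj : List (String × List String)) (priv_dns : List String)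
    (max_depth : Int) :
    Nat → List String → List String → PySem.Dict String (Option String) → Int →
    Option String × Option (List String)
  | fuel, frontier, nxt, prev, depth =>
    if max_depth < depth then (none, none)   -- 'while … and depth <= max_depth'
    else
      match frontier with
      | [] =>                                -- level finished: frontier = nxt_frontier; depth += 1
        match nxt with
        | [] => (none, none)                 -- 'while frontier' fails
        | m :: ms => pvLoopB start_dn adj priv_dns max_depth fuel (m :: ms) [] prev (depth + 1)
      | node :: rest =>
        match fuel with
        | 0 => (none, none)                  -- fuel guard only, never reached (see pvFuel)
        | f + 1 =>
          if priv_dns.contains node && node != start_dn then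
            (some node, some (pvBuildPath prev (prev.size + 1) (some node) []))
          else
            let st := ((PySem.Dict.mk adj).getD node []).foldl
              (fun (st : PySem.Dict String (Option String) × List String) nb =>
                if st.1.contains nb then st
                else (st.1.insert nb (some node), st.2 ++ [nb]))
              (prev, nxt)
            pvLoopB start_dn adj priv_dns max_depth f rest st.2 st.1 depth
  termination_by fuel frontier _ _ _ => 2 * fuel + (if frontier.isEmpty then 1 else 0)
  decreasing_by
    all_goals simp_all
    all_goals first | omega | (split <;> omega)

def bfs_shortest_path_to_any_priv_alt (start_dn : String) (adj : List (String × List String)) (priv_dns : List String) (max_depth : Int) : Option String × Option (List String) :=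
  pvLoopB start_dn adj priv_dns max_depth (pvFuel adj) [start_dn] []
    (PySem.Dict.mk [(start_dn, none)]) 0

-- ===== PRECONDITION & SPEC =====
def Spec_bfs_shortest_path_to_any_priv (start_dn : String) (adj : List (String × List String)) (priv_dns : List String) (max_depth : Int) (out : Option String × Option (List String)) : Prop := out = bfs_shortest_path_to_any_priv_alt start_dn adj priv_dns max_depth
instance (start_dn : String) (adj : List (String × List String)) (priv_dns : List String) (max_depth : Int) (out : Option String × Option (List String)) : Decidable (Spec_bfs_shortest_path_to_any_priv start_dn adj priv_dns max_depth out) := by unfold Spec_bfs_shortest_path_to_any_priv; infer_instance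

-- ===== CLAIM (what is proved, stated in full; the proofs are below) =====
def Claim_equal_bfs_shortest_path_to_any_priv : Prop := ∀ (start_dn : String) (adj : List (String × List String)) (priv_dns : List String) (max_depth : Int), Dom_bfs_shortest_path_to_any_priv start_dn adj priv_dns max_depth → Spec_bfs_shortest_path_to_any_priv start_dn adj priv_dns max_depth (bfs_shortest_path_to_any_priv start_dn adj priv_dns max_depth)

-- ===== LEMMAS AND PROOFS =====

-- The neighbor-expansion folds of A and B, run from synchronized states, stay
-- synchronized: same prev, the same fresh nodes appended (to A's queue / B's
-- next frontier), and A's depth dict records d+1 for every appended node.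
lemma pv_fold_rel (cur : String) (d : Int) :
    ∀ (ns : List String) (prev : PySem.Dict String (Option String))
      (dep : PySem.Dict String Int) (q nx : List String),
      (∀ x, prev.contains x = dep.contains x) →
      ∃ P D added,
        ns.foldl
          (fun (st : PySem.Dict String (Option String) × PySem.Dict String Int × List String) nxt =>
            if st.1.contains nxt then st
            else (st.1.insert nxt (some cur), st.2.1.insert nxt (d + 1), st.2.2 ++ [nxt]))
          (prev, dep, q) = (P, D, q ++ added) ∧
        ns.foldl
          (fun (st : PySem.Dict String (Option String) × List String) nb =>
            if st.1.contains nb then st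
            else (st.1.insert nb (some cur), st.2 ++ [nb]))
          (prev, nx) = (P, nx ++ added) ∧
        (∀ x, P.contains x = D.contains x) ∧
        (∀ x v, dep.get? x = some v → D.get? x = some v) ∧
        (∀ x ∈ added, D.get? x = some (d + 1)) := by
  intro ns
  induction ns with
  | nil =>
    intro prev dep q nx hsync
    exact ⟨prev, dep, [], by simp, by simp, hsync, fun _ _ h => h, by simp⟩
  | cons n ns ih =>
    intro prev dep q nx hsync
    by_cases h : prev.contains n = true
    · simpa [List.foldl_cons, h] using ih prev dep q nx hsync
    · have h' : prev.contains n = false := by simpa using h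
      have hdep : dep.get? n = none := by
        rw [PySem.Dict.get?_eq_none_iff_contains]; rw [← hsync]; exact h'
      have hsync' : ∀ x, (prev.insert n (some cur)).contains x = (dep.insert n (d + 1)).contains x := by
        intro x; simp [PySem.Dict.contains_insert, hsync x]
      obtain ⟨P, D, added, hA, hB, hs, hpres, hadd⟩ :=
        ih (prev.insert n (some cur)) (dep.insert n (d + 1)) (q ++ [n]) (nx ++ [n]) hsync'
      refine ⟨P, D, n :: added, ?_, ?_, hs, ?_, ?_⟩
      · simpa [List.foldl_cons, h', List.append_assoc] using hA
      · simpa [List.foldl_cons, h', List.append_assoc] using hB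
      · intro x v hx
        have hne : x ≠ n := by intro e; rw [e, hdep] at hx; simp at hx
        exact hpres x v (by rw [PySem.Dict.get?_insert_of_ne _ _ hne]; exact hx)
      · intro x hx
        rcases List.mem_cons.mp hx with rfl | hx
        · exact hpres x (d + 1) (PySem.Dict.get?_insert_self _ _ _)
        · exact hadd x hx

-- Once every queued node is deeper than max_depth, A only drains its queue and
-- returns (None, None).
lemma pv_drain (start_dn : String) (adj : List (String × List String)) (priv_dns : List String)
    (max_depth : Int) :
    ∀ (fuel : Nat) (q : List String) (prev : PySem.Dict String (Option String))
      (dep : PySem.Dict String Int),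
      (∀ x ∈ q, ∃ dx, dep.get? x = some dx ∧ max_depth < dx) →
      pvLoopA start_dn adj priv_dns max_depth fuel q prev dep = (none, none) := by
  intro fuel
  induction fuel with
  | zero => intro q prev dep h; cases q <;> simp [pvLoopA]
  | succ f ih =>
    intro q prev dep h
    cases q with
    | nil => simp [pvLoopA]
    | cons cur q' =>
      obtain ⟨dx, hget, hlt⟩ := h cur (List.mem_cons_self ..)
      have hgd : dep.getD cur 0 = dx := PySem.Dict.getD_of_get?_eq_some dep 0 hget
      rw [pvLoopA]
      simp only [hgd, if_pos hlt]
      exact ih q' prev dep (fun x hx => h x (List.mem_cons_of_mem _ hx))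

-- Main simulation: A's queue is (current level ++ next level); B keeps the two
-- levels apart with the depth counter d.  Both loops consume one fuel unit per
-- processed node, so they agree for EVERY fuel.
lemma pv_main (start_dn : String) (adj : List (String × List String)) (priv_dns : List String)
    (max_depth : Int) :
    ∀ (N fuel : Nat) (rest next : List String) (prev : PySem.Dict String (Option String))
      (dep : PySem.Dict String Int) (d : Int),
      2 * fuel + (if rest.isEmpty then 1 else 0) = N →
      (∀ x ∈ rest, dep.get? x = some d) →
      (∀ x ∈ next, dep.get? x = some (d + 1)) →
      (∀ x, prev.contains x = dep.contains x) →
      d ≤ max_depth →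
      pvLoopA start_dn adj priv_dns max_depth fuel (rest ++ next) prev dep
        = pvLoopB start_dn adj priv_dns max_depth fuel rest next prev d := by
  intro N
  induction N using Nat.strong_induction_on with
  | _ N IH =>
    intro fuel rest next prev dep d hN h1 h2 hsync hd
    have hnd : ¬ max_depth < d := not_lt.mpr hd
    cases rest with
    | nil =>
      simp only [List.isEmpty_nil, if_pos] at hN
      cases next with
      | nil => rw [pvLoopB.eq_def]; simp [pvLoopA, hnd]
      | cons m ms =>
        rw [pvLoopB.eq_def]
        simp only [if_neg hnd, List.nil_append]
        by_cases hlt : max_depth < d + 1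
        · rw [pvLoopB.eq_def]
          simp only [if_pos hlt]
          exact pv_drain start_dn adj priv_dns max_depth fuel (m :: ms) prev dep
            (fun x hx => ⟨d + 1, h2 x hx, hlt⟩)
        · have := IH (2 * fuel + (if (m :: ms).isEmpty then 1 else 0)) (by simp; omega)
            fuel (m :: ms) [] prev dep (d + 1) rfl h2 (by simp) hsync (not_lt.mp hlt)
          simpa using this
    | cons cur rest' =>
      simp only [List.isEmpty_cons, if_neg (by simp : ¬ (false = true))] at hN
      cases fuel with
      | zero => rw [pvLoopB.eq_def]; simp [pvLoopA, hnd]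
      | succ f =>
        have hcur : dep.get? cur = some d := h1 cur (List.mem_cons_self ..)
        have hgd : dep.getD cur 0 = d := PySem.Dict.getD_of_get?_eq_some dep 0 hcur
        rw [List.cons_append, pvLoopA, pvLoopB.eq_def]
        simp only [hgd, if_neg hnd]
        by_cases hpriv : (priv_dns.contains cur && cur != start_dn) = true
        · simp only [hpriv, if_pos]
        · simp only [Bool.not_eq_true] at hpriv
          simp only [hpriv, if_neg (by simp : ¬ (false = true))]
          obtain ⟨P, D, added, hA, hB, hs, hpres, hadd⟩ :=
            pv_fold_rel cur d ((PySem.Dict.mk adj).getD cur []) prev dep (rest' ++ next) next hsync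
          rw [hA, hB]
          have h1' : ∀ x ∈ rest', D.get? x = some d :=
            fun x hx => hpres x d (h1 x (List.mem_cons_of_mem _ hx))
          have h2' : ∀ x ∈ next ++ added, D.get? x = some (d + 1) := by
            intro x hx
            rcases List.mem_append.mp hx with hx | hx
            · exact hpres x (d + 1) (h2 x hx)
            · exact hadd x hx
          have hlt : 2 * f + (if rest'.isEmpty then 1 else 0) < N := by
            have : (if rest'.isEmpty then 1 else 0) ≤ 1 := by split <;> omega
            omega
          have := IH (2 * f + (if rest'.isEmpty then 1 else 0)) hlt
            f rest' (next ++ added) P D d rfl h1' h2' hs hd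
          rw [List.append_assoc] 
          exact this

-- ===== VERDICT (by name: the statement is the Claim_ definition above) =====
theorem bfs_shortest_path_to_any_priv_spec : Claim_equal_bfs_shortest_path_to_any_priv := by
  intro start_dn adj priv_dns max_depth _
  unfold Spec_bfs_shortest_path_to_any_priv
  unfold bfs_shortest_path_to_any_priv bfs_shortest_path_to_any_priv_alt
  by_cases h0 : max_depth < 0
  · rw [pvLoopB.eq_def]
    simp only [if_pos h0]
    exact pv_drain start_dn adj priv_dns max_depth _ _ _ _
      (by
        intro x hx
        rw [List.mem_singleton] at hx
        subst hx
        exact ⟨0, by simp [PySem.Dict.get?_mk_cons], h0⟩)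
  · have := pv_main start_dn adj priv_dns max_depth (2 * pvFuel adj) (pvFuel adj)
      [start_dn] [] (PySem.Dict.mk [(start_dn, none)]) (PySem.Dict.mk [(start_dn, 0)]) 0
      (by simp)
      (by
        intro x hx
        rw [List.mem_singleton] at hx
        subst hx
        simp [PySem.Dict.get?_mk_cons])
      (by simp)
      (by intro x; simp [PySem.Dict.contains_mk])
      (not_lt.mp h0)
    simpa using this
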